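-- pv_equiv track=rewrite | github.com/ameymeher/Leetcode-Learnings | Assessment questions/Meta/Level 1/Kaitenzushi.py | getMaximumEatenDishCount
-- ===== SOURCE A (Python) =====
-- from typing import List
--
-- def getMaximumEatenDishCount(N: int, D: List[int], K: int) -> int:
--   # Write your code here
--   from collections import Counter,deque
--
--   last_dishes = set()
--   order = deque()
--
--   ans = 0
--
--   for dish in D:
--     if dish not in last_dishes:
--       ans +=1
--       last_dishes.add(dish)
--       order.append(dish)
--
--       if len(last_dishes) > K:
--         last_dishes.remove(order.popleft())
--
--   return ans
-- ===== SOURCE B (Python) =====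
-- from typing import List
--
-- def getMaximumEatenDishCount(N: int, D: List[int], K: int) -> int:
--   last_pos = {}
--   ans = 0
--   for dish in D:
--     p = last_pos.get(dish)
--     if p is None or ans - p >= K:
--       ans += 1
--       last_pos[dish] = ans
--   return ans
-- ===== Notes on version B (the rewrite author's own statement) =====
-- stated objective: simpler
-- what changed: Replaced the set+deque sliding window (with its explicit 'len > K: popleft' eviction branch) by a single dict mapping each dish to the eaten-order position at which it was last eaten; a dish is eaten iff it was never eaten or at least K eats happened since, so FIFO eviction disappears into an arithmetic comparison of positions.
import Mathlib
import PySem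

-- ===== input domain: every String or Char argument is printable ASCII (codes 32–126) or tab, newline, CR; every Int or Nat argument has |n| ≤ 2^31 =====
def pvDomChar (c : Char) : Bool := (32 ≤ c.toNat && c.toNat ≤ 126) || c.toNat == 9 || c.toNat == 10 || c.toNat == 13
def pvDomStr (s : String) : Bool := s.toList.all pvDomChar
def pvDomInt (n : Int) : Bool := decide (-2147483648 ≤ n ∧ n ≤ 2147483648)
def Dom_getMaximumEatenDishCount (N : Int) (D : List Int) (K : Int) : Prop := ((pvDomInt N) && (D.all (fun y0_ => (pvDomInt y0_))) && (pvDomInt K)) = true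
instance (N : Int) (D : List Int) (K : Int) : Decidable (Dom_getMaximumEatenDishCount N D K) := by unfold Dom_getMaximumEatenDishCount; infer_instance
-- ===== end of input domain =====

-- B replaces A's set+deque sliding window by a single dict mapping each dish to the
-- eaten-order position at which it was last eaten; the FIFO eviction branch disappears
-- and window membership becomes an arithmetic comparison of positions (objective: simpler).

-- ===== PORT A =====
-- one iteration of A's 'for dish in D' loop; state = (last_dishes, order, ans)
def pvStepA (K : Int) (st : PySem.Set Int × List Int × Int) (dish : Int) :
    PySem.Set Int × List Int × Int :=
  if PySem.Set.contains st.1 dish then st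
  else
    let ans := st.2.2 + 1
    let S := PySem.Set.add st.1 dish
    let Q := st.2.1 ++ [dish]
    if PySem.Set.len S > K then
      match Q with
      | [] => (S, [], ans)          -- unreachable: the deque was just appended to
      | h :: t => ((PySem.Set.remove? S h).getD S, t, ans)
    else (S, Q, ans)

def getMaximumEatenDishCount (N : Int) (D : List Int) (K : Int) : Int :=
  (D.foldl (pvStepA K) (PySem.Set.empty, [], 0)).2.2

-- ===== PORT B =====
-- one iteration of B's loop; state = (last_pos, ans)
def pvStepB (K : Int) (st : PySem.Dict Int Int × Int) (dish : Int) :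
    PySem.Dict Int Int × Int :=
  match st.1.get? dish with
  | none => (st.1.insert dish (st.2 + 1), st.2 + 1)
  | some p => if st.2 - p ≥ K then (st.1.insert dish (st.2 + 1), st.2 + 1) else st

def getMaximumEatenDishCount_alt (N : Int) (D : List Int) (K : Int) : Int :=
  (D.foldl (pvStepB K) (PySem.Dict.empty, 0)).2

-- ===== PRECONDITION & SPEC =====
def Spec_getMaximumEatenDishCount (N : Int) (D : List Int) (K : Int) (out : Int) : Prop := out = getMaximumEatenDishCount_alt N D K
instance (N : Int) (D : List Int) (K : Int) (out : Int) : Decidable (Spec_getMaximumEatenDishCount N D K out) := by unfold Spec_getMaximumEatenDishCount; infer_instance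

-- ===== CLAIM (what is proved, stated in full; the proofs are below) =====
def Claim_equal_getMaximumEatenDishCount : Prop := ∀ (N : Int) (D : List Int) (K : Int), Dom_getMaximumEatenDishCount N D K → Spec_getMaximumEatenDishCount N D K (getMaximumEatenDishCount N D K)

-- ===== LEMMAS AND PROOFS =====

-- Coupling invariant between A's state (S, Q, a) and B's state (d, b):
-- S holds the deque's elements; the deque Q lists, oldest first, exactly the
-- dishes whose recorded last-eaten position p satisfies b - p < K, and those
-- positions are b-|Q|+1, …, b.
def pvInv (K : Int) (S : PySem.Set Int) (Q : List Int) (a : Int)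
    (d : PySem.Dict Int Int) (b : Int) : Prop :=
  S = Q ∧ a = b ∧ Q.Nodup ∧
  (∀ (i : Nat) (h : i < Q.length), d.get? Q[i] = some (b - Q.length + i + 1)) ∧
  (∀ x p, d.get? x = some p → 1 ≤ p ∧ p ≤ b ∧ (b - p < K → x ∈ Q)) ∧
  (Q.length : Int) ≤ max K 0 ∧ 0 ≤ b

lemma pvDiscard (x : Int) (t : List Int) (hx : x ∉ t) :
    PySem.Set.discard (x :: t) x = t := by
  simp only [PySem.Set.discard, List.filter_cons, beq_self_eq_true, Bool.not_true,
    Bool.false_eq_true, if_false]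
  refine List.filter_eq_self.2 (fun y hy => ?_)
  have hne : y ≠ x := fun e => hx (e ▸ hy)
  simp [hne]

lemma pvNodupConcat (t : List Int) (x : Int) (h1 : t.Nodup) (h2 : x ∉ t) :
    (t ++ [x]).Nodup := by
  induction t with
  | nil => simp
  | cons y ys ih =>
    rw [List.cons_append, List.nodup_cons]
    refine ⟨?_, ih (List.nodup_cons.1 h1).2 (fun hh => h2 (List.mem_cons_of_mem _ hh))⟩
    intro hmem'
    rcases List.mem_append.1 hmem' with h | h
    · exact (List.nodup_cons.1 h1).1 h
    · simp at h
      exact h2 (by rw [← h]; exact List.mem_cons_self ..)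

lemma pvStep (K dish : Int) (S : PySem.Set Int) (Q : List Int) (a : Int)
    (d : PySem.Dict Int Int) (b : Int) (h : pvInv K S Q a d b) :
    pvInv K (pvStepA K (S, Q, a) dish).1 (pvStepA K (S, Q, a) dish).2.1
      (pvStepA K (S, Q, a) dish).2.2 (pvStepB K (d, b) dish).1 (pvStepB K (d, b) dish).2 := by
  obtain ⟨hSQ, hab, hnd, hidx, hdom, hlen, hb⟩ := h
  subst hSQ hab
  by_cases hmem : dish ∈ S
  · -- both sides skip
    have hA : pvStepA K (S, S, a) dish = (S, S, a) := by
      simp [pvStepA, hmem]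
    have hKpos : (1 : Int) ≤ K := by
      have h1 : 0 < S.length := List.length_pos_of_mem hmem
      have : (1 : Int) ≤ (S.length : Int) := by exact_mod_cast h1
      omega
    obtain ⟨i, hi, hQi⟩ := List.mem_iff_getElem.1 hmem
    have hd : d.get? dish = some (a - S.length + i + 1) := by rw [← hQi]; exact hidx i hi
    have hB : pvStepB K (d, a) dish = (d, a) := by
      have : ¬ (a - (a - S.length + i + 1) ≥ K) := by
        have : (S.length : Int) ≤ max K 0 := hlen
        omega
      simp [pvStepB, hd, this]
    rw [hA, hB]
    exact ⟨rfl, rfl, hnd, hidx, hdom, hlen, hb⟩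
  · -- both sides eat
    have hBeat : pvStepB K (d, a) dish = (d.insert dish (a + 1), a + 1) := by
      cases hd : d.get? dish with
      | none => simp [pvStepB, hd]
      | some p =>
        have hnk := (hdom dish p hd).2.2
        have hge : a - p ≥ K := by by_contra hlt; exact hmem (hnk (by omega))
        simp [pvStepB, hd, hge]
    have hcon : PySem.Set.contains S dish = false := by
      rw [← Bool.not_eq_true, PySem.Set.contains_iff]; exact hmem
    have hadd : PySem.Set.add S dish = S ++ [dish] := PySem.Set.add_of_not_mem hmem
    -- facts about d' := d.insert dish (a+1)
    have hget' : ∀ x, (d.insert dish (a + 1)).get? x = if x = dish then some (a + 1) else d.get? x := by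
      intro x; simp [PySem.Dict.get?_insert]
    rw [hBeat]
    by_cases hpop : PySem.Set.len (S ++ [dish]) > K
    · -- the window overflows: A evicts the deque's head
      cases S with
      | nil =>
        have hKle : K ≤ 0 := by
          simp only [PySem.Set.len, List.nil_append, List.length_cons, List.length_nil] at hpop
          omega
        simp only [List.nil_append] at hpop
        have hA : pvStepA K (([] : List Int), ([] : List Int), a) dish = ([], [], a + 1) := by
          simp [pvStepA, PySem.Set.remove?, pvDiscard dish [] List.not_mem_nil]
          omega
        rw [hA]
        refine ⟨rfl, rfl, List.nodup_nil, ?_, ?_, ?_, by omega⟩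
        · intro i hi; simp at hi
        · intro x p hx
          rw [hget'] at hx
          by_cases hxd : x = dish
          · rw [if_pos hxd] at hx
            have hp : p = a + 1 := (Option.some.inj hx).symm
            exact ⟨by omega, by omega, fun hlt => absurd hlt (by omega)⟩
          · rw [if_neg hxd] at hx
            obtain ⟨h1, h2, _⟩ := hdom x p hx
            exact ⟨h1, by omega, fun hlt => absurd hlt (by omega)⟩
        · simp

      | cons q qt =>
        have hlen' : ((qt.length : Int) + 2) > K := by
          simp only [PySem.Set.len, List.cons_append, List.length_cons, List.length_append,
            List.length_nil] at hpop
          push_cast at hpop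
          omega
        have hlenQ : ((q :: qt).length : Int) ≤ max K 0 := hlen
        have hQK : ((qt.length : Int) + 1) = K := by
          simp only [List.length_cons] at hlenQ
          push_cast at hlenQ
          omega
        have hqd : q ≠ dish := by
          intro e; exact hmem (by simp [← e])
        have hqnt : q ∉ qt := (List.nodup_cons.1 hnd).1
        have hdq : dish ∉ qt := fun h => hmem (List.mem_cons_of_mem _ h)
        have hrem : PySem.Set.remove? (q :: (qt ++ [dish])) q = some (qt ++ [dish]) := by
          rw [PySem.Set.remove?_of_mem (List.mem_cons_self ..)]
          rw [pvDiscard q (qt ++ [dish]) (by simp [hqnt, hqd])]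
        simp only [List.cons_append] at hpop
        have hA : pvStepA K ((q :: qt), (q :: qt), a) dish
            = (qt ++ [dish], qt ++ [dish], a + 1) := by
          simp [pvStepA, hrem, Ne.symm hqd, hdq, hQK]
        rw [hA]
        refine ⟨rfl, rfl, ?_, ?_, ?_, ?_, by omega⟩
        · exact pvNodupConcat qt dish (List.nodup_cons.1 hnd).2 hdq
        · intro i hi
          simp only [List.length_append, List.length_cons, List.length_nil] at hi
          by_cases hiq : i < qt.length
          · rw [List.getElem_append_left hiq]
            have hne : qt[i] ≠ dish := fun e => hdq (e ▸ List.getElem_mem hiq)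
            rw [hget', if_neg hne]
            have h2 := hidx (i + 1) (by simp; omega)
            rw [List.getElem_cons_succ] at h2
            rw [h2]
            congr 1
            simp only [List.length_cons, List.length_append, List.length_nil]
            push_cast
            omega
          · have hieq : i = qt.length := by omega
            rw [List.getElem_concat_length hieq]
            rw [hget', if_pos rfl]
            congr 1
            simp only [List.length_append, List.length_cons, List.length_nil]
            push_cast
            omega
        · intro x p hx
          rw [hget'] at hx
          by_cases hxd : x = dish
          · rw [if_pos hxd] at hx
            have hp : p = a + 1 := (Option.some.inj hx).symm
            exact ⟨by omega, by omega, fun _ => by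
              subst hxd; exact List.mem_append.2 (Or.inr (by simp))⟩
          · rw [if_neg hxd] at hx
            obtain ⟨h1, h2, h3⟩ := hdom x p hx
            refine ⟨h1, by omega, ?_⟩
            intro hlt
            have hxS : x ∈ q :: qt := h3 (by omega)
            rcases List.mem_cons.1 hxS with rfl | hxqt
            · exfalso
              have h0 := hidx 0 (by simp)
              simp only [List.getElem_cons_zero, List.length_cons] at h0
              rw [hx] at h0
              have hp := Option.some.inj h0
              push_cast at hp
              omega
            · exact List.mem_append.2 (Or.inl hxqt)
        · simp only [List.length_append, List.length_cons, List.length_nil]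
          push_cast
          omega
    · -- no eviction
      have hKlen : (S.length : Int) + 1 ≤ K := by
        simp only [PySem.Set.len, List.length_append, List.length_cons, List.length_nil,
          not_lt] at hpop
        push_cast at hpop
        omega
      have hA : pvStepA K (S, S, a) dish = (S ++ [dish], S ++ [dish], a + 1) := by
        have hub : ¬ (K ≤ (S.length : Int)) := by omega
        simp [pvStepA, PySem.Set.len, hub, hmem]
      rw [hA]
      have hdS : dish ∉ S := hmem
      refine ⟨rfl, rfl, ?_, ?_, ?_, ?_, by omega⟩
      · exact pvNodupConcat S dish hnd hdS
      · intro i hi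
        simp only [List.length_append, List.length_cons, List.length_nil] at hi
        by_cases hiq : i < S.length
        · rw [List.getElem_append_left hiq]
          have hne : S[i] ≠ dish := fun e => hdS (e ▸ List.getElem_mem hiq)
          rw [hget', if_neg hne]
          rw [hidx i hiq]
          congr 1
          simp only [List.length_append, List.length_cons, List.length_nil]
          push_cast
          omega
        · have hieq : i = S.length := by omega
          rw [List.getElem_concat_length hieq]
          rw [hget', if_pos rfl]
          congr 1
          simp only [List.length_append, List.length_cons, List.length_nil]
          push_cast
          omega
      · intro x p hx
        rw [hget'] at hx
        by_cases hxd : x = dish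
        · rw [if_pos hxd] at hx
          have hp : p = a + 1 := (Option.some.inj hx).symm
          exact ⟨by omega, by omega, fun _ => by
            subst hxd; exact List.mem_append.2 (Or.inr (by simp))⟩
        · rw [if_neg hxd] at hx
          obtain ⟨h1, h2, h3⟩ := hdom x p hx
          exact ⟨h1, by omega, fun hlt => List.mem_append.2 (Or.inl (h3 (by omega)))⟩
      · simp only [List.length_append, List.length_cons, List.length_nil]
        push_cast
        omega

lemma pvFold (K : Int) (D : List Int) (S : PySem.Set Int) (Q : List Int) (a : Int)
    (d : PySem.Dict Int Int) (b : Int) (h : pvInv K S Q a d b) :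
    (D.foldl (pvStepA K) (S, Q, a)).2.2 = (D.foldl (pvStepB K) (d, b)).2 := by
  induction D generalizing S Q a d b with
  | nil => exact h.2.1
  | cons x xs ih =>
    have h' := pvStep K x S Q a d b h
    simpa using ih _ _ _ _ _ h'

lemma pvInit (K : Int) : pvInv K PySem.Set.empty [] 0 PySem.Dict.empty 0 := by
  refine ⟨rfl, rfl, List.nodup_nil, ?_, ?_, ?_, le_refl 0⟩
  · intro i h; simp at h
  · intro x p hx; simp [PySem.Dict.get?_empty] at hx
  · simp

-- ===== VERDICT (by name: the statement is the Claim_ definition above) =====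
theorem getMaximumEatenDishCount_spec : Claim_equal_getMaximumEatenDishCount := by
  intro N D K _
  show _ = _
  exact pvFold K D _ _ _ _ _ (pvInit K)
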